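-- pv_equiv track=rewrite | github.com/oliver-zehentleitner/unicorn-binance-websocket-api | unicorn_binance_websocket_api/manager.py | order_params
-- ===== SOURCE A (Python) =====
-- from operator import itemgetter
--
-- def order_params(data):
--     """
--     Convert params to list with signature as last element
--
--     :param data:
--     :return:
--
--     """
--     has_signature = False
--     params = []
--     for key, value in data.items():
--         if key == 'signature':
--             has_signature = True
--         else:
--             params.append((key, value))
--     # sort parameters by key
--     params.sort(key=itemgetter(0))
--     if has_signature:
--         params.append(('signature', data['signature']))
--     return params
-- ===== SOURCE B (Python) =====
-- def order_params(data):
--     """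
--     Convert params to list with signature as last element
--     """
--     params = []
--     sig_value = None
--     for key, value in data.items():
--         if key == 'signature':
--             sig_value = value
--         else:
--             i = 0
--             while i < len(params) and params[i][0] < key:
--                 i += 1
--             params.insert(i, (key, value))
--     if sig_value is not None:
--         params.append(('signature', sig_value))
--     return params
-- ===== Notes on version B (the rewrite author's own statement) =====
-- stated objective: alternative
-- what changed: Replaces A's collect-then-library-sort-then-conditional-append (with a second dict lookup for the signature value) by a single pass that maintains the non-signature pairs in sorted order via positional insertion and remembers the signature value as it streams by, so no separate sort phase and no second lookup exist.
import Mathlib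
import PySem

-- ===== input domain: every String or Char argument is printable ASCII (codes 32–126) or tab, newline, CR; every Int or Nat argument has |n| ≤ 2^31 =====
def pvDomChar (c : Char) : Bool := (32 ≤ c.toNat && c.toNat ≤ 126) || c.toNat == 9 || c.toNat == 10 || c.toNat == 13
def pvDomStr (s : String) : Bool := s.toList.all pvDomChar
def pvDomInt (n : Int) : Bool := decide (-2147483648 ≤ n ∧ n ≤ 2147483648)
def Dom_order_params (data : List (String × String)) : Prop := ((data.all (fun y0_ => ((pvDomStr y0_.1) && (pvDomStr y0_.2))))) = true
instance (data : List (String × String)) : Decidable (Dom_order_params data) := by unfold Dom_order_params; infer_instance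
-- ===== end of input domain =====

-- B replaces A's collect-then-sort-then-conditional-append (plus a second dict lookup)
-- by ONE pass that keeps the non-signature pairs sorted by positional insertion and
-- remembers the signature value as it streams by (objective: alternative, not faster).
-- (Python A sorts a fresh local list, so no caller-visible mutation is at stake.)

-- ===== PORT A =====
def order_params (data : List (String × String)) : List (String × String) :=
  -- has_signature / params accumulated by the for-loop, as a foldl over the items
  let st := data.foldl
    (fun (st : Bool × List (String × String)) kv =>
      if kv.1 == "signature" then (true, st.2) else (st.1, st.2 ++ [kv]))
    (false, [])
  -- params.sort(key=itemgetter(0))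
  let params := PySem.List.sorted st.2 (fun p => p.1)
  if st.1 then
    match PySem.Dict.get? ⟨data⟩ "signature" with
    | some v => params ++ [("signature", v)]
    | none => params  -- unreachable: the flag is set only when the key is present
  else params

-- ===== PORT B =====
-- the inner while/insert of B: place kv before the first element whose key is not < kv's
def opInsert : List (String × String) → String × String → List (String × String)
  | [], kv => [kv]
  | p :: rest, kv => if p.1 < kv.1 then p :: opInsert rest kv else kv :: p :: rest

def order_params_alt (data : List (String × String)) : List (String × String) :=
  let st := data.foldl
    (fun (st : Option String × List (String × String)) kv =>
      if kv.1 == "signature" then (some kv.2, st.2) else (st.1, opInsert st.2 kv))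
    (none, [])
  match st.1 with
  | some v => st.2 ++ [("signature", v)]
  | none => st.2

-- ===== PRECONDITION & SPEC =====
-- Pre_ excludes association lists with duplicate keys: they cannot arise from the
-- Python dict argument, so the ports' behaviour on them corresponds to no Python run.
def Pre_order_params (data : List (String × String)) : Prop := (data.map Prod.fst).Nodup
instance (data : List (String × String)) : Decidable (Pre_order_params data) := by
  unfold Pre_order_params; infer_instance
def pvWitness_order_params : (List (String × String)) :=
  [("b", "2"), ("a", "1"), ("signature", "s")]
def Spec_order_params (data : List (String × String)) (out : List (String × String)) : Prop := out = order_params_alt data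
instance (data : List (String × String)) (out : List (String × String)) : Decidable (Spec_order_params data out) := by unfold Spec_order_params; infer_instance

-- ===== CLAIM (what is proved, stated in full; the proofs are below) =====
def Claim_equal_order_params : Prop := ∀ (data : List (String × String)), Dom_order_params data → Pre_order_params data → Spec_order_params data (order_params data)

-- ===== LEMMAS AND PROOFS =====

-- the for-loop of A computes (flag ∨ a signature key occurs, acc ++ the non-signature pairs)
lemma op_fold_eq (data : List (String × String)) (b : Bool) (acc : List (String × String)) :
    data.foldl
      (fun (st : Bool × List (String × String)) kv =>
        if kv.1 == "signature" then (true, st.2) else (st.1, st.2 ++ [kv]))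
      (b, acc)
    = (b || data.any (fun kv => kv.1 == "signature"),
       acc ++ data.filter (fun kv => !(kv.1 == "signature"))) := by
  induction data generalizing b acc with
  | nil => simp
  | cons x xs ih =>
    by_cases hx : x.1 = "signature"
    · simp only [List.foldl_cons, hx, beq_self_eq_true, if_true]
      rw [ih]; simp [hx]
    · have hxb : (x.1 == "signature") = false := by simp [hx]
      simp only [List.foldl_cons, hxb, Bool.false_eq_true, if_false]
      rw [ih]; simp [hxb]

-- the for-loop of B computes (last signature value seen, insertion fold of the others)
lemma opb_fold_eq (data : List (String × String)) (s : Option String)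
    (acc : List (String × String)) :
    data.foldl
      (fun (st : Option String × List (String × String)) kv =>
        if kv.1 == "signature" then (some kv.2, st.2) else (st.1, opInsert st.2 kv))
      (s, acc)
    = ((data.filter (fun kv => kv.1 == "signature")).foldl (fun _ kv => some kv.2) s,
       (data.filter (fun kv => !(kv.1 == "signature"))).foldl opInsert acc) := by
  induction data generalizing s acc with
  | nil => simp
  | cons x xs ih =>
    by_cases hx : x.1 = "signature"
    · simp only [List.foldl_cons, hx, beq_self_eq_true, if_true]
      rw [ih]; simp [hx]
    · have hxb : (x.1 == "signature") = false := by simp [hx]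
      simp only [List.foldl_cons, hxb, Bool.false_eq_true, if_false]
      rw [ih]; simp [hxb]

-- with nodup keys and some signature key present, the first match and the filter agree
lemma op_sig_found (data : List (String × String))
    (hnd : (data.map Prod.fst).Nodup)
    (hany : data.any (fun kv => kv.1 == "signature") = true) :
    ∃ v, List.find? (fun p => p.1 == "signature") data = some ("signature", v) ∧
         data.filter (fun kv => kv.1 == "signature") = [("signature", v)] := by
  induction data with
  | nil => simp at hany
  | cons x xs ih =>
    rcases x with ⟨k, v⟩
    simp only [List.map_cons, List.nodup_cons] at hnd
    by_cases hk : k = "signature"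
    · subst hk
      refine ⟨v, by simp, ?_⟩
      have hxs : xs.filter (fun kv => kv.1 == "signature") = [] := by
        rw [List.filter_eq_nil_iff]
        intro a ha
        simp only [beq_iff_eq]
        intro hsig
        exact hnd.1 (by simpa [hsig] using List.mem_map_of_mem (f := Prod.fst) ha)
      simp [hxs]
    · have hany' : xs.any (fun kv => kv.1 == "signature") = true := by
        simpa [List.any_cons, hk] using hany
      obtain ⟨w, hf, hfil⟩ := ih hnd.2 hany'
      exact ⟨w, by simp [hk, hf], by simp [hk, hfil]⟩

lemma opInsert_perm (l : List (String × String)) (kv : String × String) :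
    (opInsert l kv).Perm (kv :: l) := by
  induction l with
  | nil => simp [opInsert]
  | cons p rest ih =>
    by_cases h : p.1 < kv.1
    · simp only [opInsert, h, if_true]
      exact (ih.cons p).trans (List.Perm.swap p kv rest).symm
    · simp [opInsert, h]

lemma mem_opInsert {l : List (String × String)} {kv y : String × String} :
    y ∈ opInsert l kv ↔ y = kv ∨ y ∈ l := by
  rw [(opInsert_perm l kv).mem_iff]; simp

lemma opInsert_pairwise {l : List (String × String)} {kv : String × String}
    (h : l.Pairwise (fun a b => a.1 ≤ b.1)) :
    (opInsert l kv).Pairwise (fun a b => a.1 ≤ b.1) := by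
  induction l with
  | nil => simp [opInsert]
  | cons p rest ih =>
    rw [List.pairwise_cons] at h
    by_cases hlt : p.1 < kv.1
    · simp only [opInsert, hlt, if_true, List.pairwise_cons]
      refine ⟨?_, ih h.2⟩
      intro y hy
      rcases mem_opInsert.mp hy with rfl | hy'
      · exact le_of_lt hlt
      · exact h.1 y hy'
    · have hle : kv.1 ≤ p.1 := le_of_not_gt hlt
      simp only [opInsert, hlt, if_false, List.pairwise_cons]
      refine ⟨?_, h.1, h.2⟩
      intro y hy
      rcases List.mem_cons.mp hy with rfl | hy'
      · exact hle
      · exact hle.trans (h.1 y hy')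

lemma isort_perm (l acc : List (String × String)) :
    (l.foldl opInsert acc).Perm (acc ++ l) := by
  induction l generalizing acc with
  | nil => simp
  | cons x xs ih =>
    simp only [List.foldl_cons]
    refine (ih (opInsert acc x)).trans ?_
    have h1 : (opInsert acc x ++ xs).Perm ((x :: acc) ++ xs) :=
      (opInsert_perm acc x).append_right xs
    refine h1.trans ?_
    simpa using (List.perm_middle (a := x) (l₁ := acc) (l₂ := xs)).symm

lemma isort_pairwise (l : List (String × String)) {acc : List (String × String)}
    (h : acc.Pairwise (fun a b => a.1 ≤ b.1)) :
    (l.foldl opInsert acc).Pairwise (fun a b => a.1 ≤ b.1) := by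
  induction l generalizing acc with
  | nil => simpa using h
  | cons x xs ih => exact ih (opInsert_pairwise h)

-- the insertion fold of B IS Python's stable sort by key, given distinct keys
lemma isort_eq_sorted (l : List (String × String))
    (hnd : (l.map Prod.fst).Nodup) :
    l.foldl opInsert [] = PySem.List.sorted l (fun p => p.1) := by
  have hperm : (l.foldl opInsert []).Perm l := by simpa using isort_perm l []
  have hle := isort_pairwise l (acc := []) (by simp)
  have hnd' : ((l.foldl opInsert []).map Prod.fst).Nodup :=
    (hperm.map Prod.fst).nodup_iff.mpr hnd
  have hne : (l.foldl opInsert []).Pairwise (fun a b : String × String => a.1 ≠ b.1) :=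
    List.pairwise_map.mp hnd'
  have hlt : (l.foldl opInsert []).Pairwise (fun a b : String × String => a.1 < b.1) :=
    (hle.and hne).imp (fun h => lt_of_le_of_ne h.1 h.2)
  exact (PySem.List.sorted_eq_of_perm_of_pairwise_lt l _ _ hperm hlt).symm

-- ===== VERDICT (by name: the statement is the Claim_ definition above) =====
theorem order_params_spec : Claim_equal_order_params := by
  intro data _hdom hpre
  unfold Spec_order_params order_params order_params_alt
  rw [op_fold_eq, opb_fold_eq]
  simp only [Bool.false_or, List.nil_append]
  set filt := data.filter (fun kv => !(kv.1 == "signature")) with hfilt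
  have hndf : (filt.map Prod.fst).Nodup :=
    (List.Sublist.map Prod.fst List.filter_sublist).nodup hpre
  have hsort : PySem.List.sorted filt (fun p => p.1) = filt.foldl opInsert [] :=
    (isort_eq_sorted filt hndf).symm
  by_cases hany : data.any (fun kv => kv.1 == "signature") = true
  · obtain ⟨v, hfind, hfil⟩ := op_sig_found data hpre hany
    have hget : PySem.Dict.get? (⟨data⟩ : PySem.Dict String String) "signature" = some v := by
      simp [PySem.Dict.get?, hfind]
    simp only [hany, if_true, hget, hfil, List.foldl_cons, List.foldl_nil, hsort]
  · have hflag : data.any (fun kv => kv.1 == "signature") = false :=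
      Bool.eq_false_iff.mpr hany
    have hfil : data.filter (fun kv => kv.1 == "signature") = [] := by
      rw [List.filter_eq_nil_iff]
      intro a ha hc
      have : data.any (fun kv => kv.1 == "signature") = true :=
        List.any_eq_true.mpr ⟨a, ha, hc⟩
      simp [this] at hflag
    simp only [hflag, Bool.false_eq_true, if_false, hfil, List.foldl_nil, hsort]
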